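-- pv_equiv track=rewrite | github.com/tomterror666/AudioBookConverter | scripts/merge_mp3_chapters.py | build_chapter_metadata
-- ===== SOURCE A (Python) =====
-- def escape_meta(s: str) -> str:
--     return s.replace("\\", "\\\\").replace("=", "\\=").replace(";", "\\;").replace("#", "\\#")
--
-- def build_chapter_metadata(chapters_ms, total_duration_ms: int) -> str:
--     lines = [";FFMETADATA1", ""]
--     n = len(chapters_ms)
--     for i, (start_ms, title) in enumerate(chapters_ms):
--         if i + 1 < n:
--             end_ms = chapters_ms[i + 1][0]
--         else:
--             end_ms = total_duration_ms
--         if end_ms <= start_ms: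
--             end_ms = min(start_ms + 1000, total_duration_ms)
--         lines.append("[CHAPTER]")
--         lines.append("TIMEBASE=1/1000")
--         lines.append(f"START={int(start_ms)}")
--         lines.append(f"END={int(end_ms)}")
--         lines.append(f"title={escape_meta(title)}")
--         lines.append("")
--     return "\n".join(lines)
-- ===== SOURCE B (Python) =====
-- _ESC = {ord(c): "\\" + c for c in "\\=;#"}
--
-- def escape_meta(s: str) -> str:
--     # table-driven: one translate call instead of four replace scans
--     return s.translate(_ESC)
--
-- def build_chapter_metadata(chapters_ms, total_duration_ms: int) -> str:
--     # walk the chapters in reverse, carrying the next chapter's raw start time,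
--     # prepending each finished block to the text built so far
--     next_start = total_duration_ms
--     tail = ""
--     for start_ms, title in reversed(chapters_ms):
--         end_ms = next_start if next_start > start_ms else min(start_ms + 1000, total_duration_ms)
--         tail = ("\n[CHAPTER]\nTIMEBASE=1/1000\nSTART=%d\nEND=%d\ntitle=%s\n"
--                 % (int(start_ms), int(end_ms), escape_meta(title))) + tail
--         next_start = start_ms
--     return ";FFMETADATA1\n" + tail
-- ===== Notes on version B (the rewrite author's own statement) =====
-- stated objective: alternative
-- what changed: B walks the chapters in reverse carrying the next chapter's raw start time as an accumulator and builds the output string back-to-front (escaping via one table-driven str.translate call), instead of A's forward enumerate loop with per-iteration index lookups, a growing line list and four replace scans.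
import Mathlib
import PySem

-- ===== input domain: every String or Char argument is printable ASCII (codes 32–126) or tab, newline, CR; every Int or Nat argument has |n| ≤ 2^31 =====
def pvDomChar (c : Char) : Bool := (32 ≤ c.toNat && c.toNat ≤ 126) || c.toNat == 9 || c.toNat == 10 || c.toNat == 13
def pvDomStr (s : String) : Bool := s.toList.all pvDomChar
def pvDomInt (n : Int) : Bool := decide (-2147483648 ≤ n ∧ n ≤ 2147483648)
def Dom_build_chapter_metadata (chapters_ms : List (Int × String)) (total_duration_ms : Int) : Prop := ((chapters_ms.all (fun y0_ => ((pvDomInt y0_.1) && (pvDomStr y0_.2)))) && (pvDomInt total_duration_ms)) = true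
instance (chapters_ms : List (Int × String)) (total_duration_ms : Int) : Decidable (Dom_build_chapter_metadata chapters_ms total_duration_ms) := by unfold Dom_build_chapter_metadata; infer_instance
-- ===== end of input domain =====

-- B traverses the chapters in REVERSE, carrying the next chapter's raw start time as an accumulator
-- and building the output back-to-front (escaping via one table-driven translate), instead of A's
-- forward loop with per-iteration index lookups and four replace scans; same cost, different traversal.

-- ===== PORT A =====
def escape_meta (s : String) : String :=
  PySem.Str.replace
    (PySem.Str.replace
      (PySem.Str.replace
        (PySem.Str.replace s "\\" "\\\\") "=" "\\=") ";" "\\;") "#" "\\#"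

def build_chapter_metadata (chapters_ms : List (Int × String)) (total_duration_ms : Int) : String :=
  let lines : List String := [";FFMETADATA1", ""]
  let n : Int := chapters_ms.length
  let lines := (PySem.List.enumerate chapters_ms).foldl (fun lines p =>
      let i := p.1
      let start_ms := p.2.1
      let title := p.2.2
      let end_ms := if i + 1 < n then (PySem.List.pyGetD chapters_ms (i + 1) (0, "")).1
                    else total_duration_ms
      let end_ms := if end_ms ≤ start_ms then min (start_ms + 1000) total_duration_ms else end_ms
      lines ++ ["[CHAPTER]", "TIMEBASE=1/1000",
                "START=" ++ PySem.Int.toStr start_ms,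
                "END=" ++ PySem.Int.toStr end_ms,
                "title=" ++ escape_meta title, ""]) lines
  PySem.Str.join "\n" lines

-- ===== PORT B =====
-- str.translate(_ESC) maps each code point through the table, keeping unmapped characters:
-- ported exactly as a per-character lookup in the four-entry dict with the character itself as default.
def pvESC : PySem.Dict Char String :=
  PySem.Dict.ofList [('\\', "\\\\"), ('=', "\\="), (';', "\\;"), ('#', "\\#")]

def escape_meta_alt (s : String) : String :=
  PySem.Str.join "" (s.toList.map (fun c => (PySem.Dict.get? pvESC c).getD (String.ofList [c])))

def build_chapter_metadata_alt (chapters_ms : List (Int × String)) (total_duration_ms : Int) : String :=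
  let st := chapters_ms.reverse.foldl (fun (p : Int × String) c =>
      let end_ms := if p.1 > c.1 then p.1 else min (c.1 + 1000) total_duration_ms
      (c.1, "\n[CHAPTER]\nTIMEBASE=1/1000\nSTART=" ++ PySem.Int.toStr c.1 ++
            "\nEND=" ++ PySem.Int.toStr end_ms ++
            "\ntitle=" ++ escape_meta_alt c.2 ++ "\n" ++ p.2))
    (total_duration_ms, "")
  ";FFMETADATA1\n" ++ st.2

-- ===== PRECONDITION & SPEC =====
def Spec_build_chapter_metadata (chapters_ms : List (Int × String)) (total_duration_ms : Int) (out : String) : Prop := out = build_chapter_metadata_alt chapters_ms total_duration_ms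
instance (chapters_ms : List (Int × String)) (total_duration_ms : Int) (out : String) : Decidable (Spec_build_chapter_metadata chapters_ms total_duration_ms out) := by unfold Spec_build_chapter_metadata; infer_instance

-- ===== CLAIM (what is proved, stated in full; the proofs are below) =====
def Claim_equal_build_chapter_metadata : Prop := ∀ (chapters_ms : List (Int × String)) (total_duration_ms : Int), Dom_build_chapter_metadata chapters_ms total_duration_ms → Spec_build_chapter_metadata chapters_ms total_duration_ms (build_chapter_metadata chapters_ms total_duration_ms)

-- ===== LEMMAS AND PROOFS =====

-- per-character view of A's escape (proof bridge)
def pvEsc (s : String) : String :=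
  PySem.Str.join "" (s.toList.map (fun c =>
    if ['\\', '=', ';', '#'].contains c then String.ofList ['\\', c] else String.ofList [c]))

-- the end-time of the chapter after the current one, forward view (proof bridge)
def pvHS : List (Int × String) → Int → Int
  | [], tot => tot
  | c :: _, _ => c.1

def pvEnds (tot : Int) (ch : List (Int × String)) : List Int := (ch.drop 1).map (·.1) ++ [tot]

def pvBlock (tot : Int) (p : (Int × String) × Int) : String :=
  let start_ms := p.1.1
  let end_ms := if p.2 ≤ start_ms then min (start_ms + 1000) tot else p.2
  "\n[CHAPTER]\nTIMEBASE=1/1000\nSTART=" ++ PySem.Int.toStr start_ms ++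
    "\nEND=" ++ PySem.Int.toStr end_ms ++
    "\ntitle=" ++ pvEsc p.1.2 ++ "\n"

def pvMid (chapters_ms : List (Int × String)) (total_duration_ms : Int) : String :=
  ";FFMETADATA1\n" ++
    PySem.Str.join "" ((chapters_ms.zip (pvEnds total_duration_ms chapters_ms)).map (pvBlock total_duration_ms))

-- forward recursive form of B's reverse fold (proof bridge)
def pvS (tot : Int) : List (Int × String) → String
  | [] => ""
  | c :: rest =>
      let nxt := pvHS rest tot
      let end_ms := if nxt > c.1 then nxt else min (c.1 + 1000) tot
      "\n[CHAPTER]\nTIMEBASE=1/1000\nSTART=" ++ PySem.Int.toStr c.1 ++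
        "\nEND=" ++ PySem.Int.toStr end_ms ++
        "\ntitle=" ++ escape_meta_alt c.2 ++ "\n" ++ pvS tot rest

theorem replace_go_single (a : Char) (new : List Char) (l : List Char) :
    ∀ (fuel : Nat) (acc : List Char), l.length ≤ fuel →
      PySem.Chars.replace.go [a] new fuel l acc
        = acc.reverse ++ l.flatMap (fun c => if c = a then new else [c]) := by
  induction l with
  | nil =>
    intro fuel acc _
    cases fuel <;> simp [PySem.Chars.replace.go]
  | cons c t ih =>
    intro fuel acc h
    cases fuel with
    | zero => simp at h
    | succ fuel =>
      simp only [List.length_cons, Nat.add_le_add_iff_right] at h ⊢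
      by_cases hc : c = a
      · subst hc
        simp [PySem.Chars.replace.go, List.isPrefixOf, ih fuel _ h]
      · have hp : [a].isPrefixOf (c :: t) = false := by
          simp [List.isPrefixOf]; exact fun h' => hc h'.symm
        simp [PySem.Chars.replace.go, hp, ih fuel _ h, hc]

theorem replace_single (a : Char) (new cs : List Char) :
    PySem.Chars.replace cs [a] new
      = cs.flatMap (fun c => if c = a then new else [c]) := by
  simp [PySem.Chars.replace, replace_go_single a new cs cs.length [] le_rfl]

theorem inter_nil (xs : List (List Char)) : List.intercalate [] xs = xs.flatten := by
  induction xs with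
  | nil => rfl
  | cons x t ih =>
    cases t with
    | nil => simp [List.intercalate]
    | cons y u =>
      simp only [List.intercalate, List.intersperse] at ih ⊢
      simp [ih]

theorem escape_eq_pvEsc (s : String) : escape_meta s = pvEsc s := by
  apply String.toList_inj.mp
  simp only [escape_meta, pvEsc, PySem.Str.toList_replace, PySem.Str.join,
    String.toList_ofList, PySem.Chars.join]
  rw [show ("\\".toList : List Char) = ['\\'] from rfl,
      show ("\\\\".toList : List Char) = ['\\', '\\'] from rfl,
      show ("=".toList : List Char) = ['='] from rfl,
      show ("\\=".toList : List Char) = ['\\', '='] from rfl,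
      show (";".toList : List Char) = [';'] from rfl,
      show ("\\;".toList : List Char) = ['\\', ';'] from rfl,
      show ("#".toList : List Char) = ['#'] from rfl,
      show ("\\#".toList : List Char) = ['\\', '#'] from rfl,
      show ("".toList : List Char) = [] from rfl]
  rw [replace_single, replace_single, replace_single, replace_single]
  rw [List.flatMap_assoc, List.flatMap_assoc, List.flatMap_assoc]
  rw [inter_nil, List.map_map, List.flatMap_def]
  apply List.flatMap_congr
  intro c _
  by_cases h1 : c = '\\' <;> by_cases h2 : c = '=' <;> by_cases h3 : c = ';' <;>
    by_cases h4 : c = '#' <;> simp_all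

theorem pvEsc_eq_alt (s : String) : pvEsc s = escape_meta_alt s := by
  simp only [pvEsc, escape_meta_alt]
  congr 1
  apply List.map_congr_left
  intro c _
  have hitems : pvESC.items = [('\\', "\\\\"), ('=', "\\="), (';', "\\;"), ('#', "\\#")] := by decide
  simp only [PySem.Dict.get?, hitems]
  by_cases h1 : c = '\\'
  · subst h1; decide
  by_cases h2 : c = '='
  · subst h2; decide
  by_cases h3 : c = ';'
  · subst h3; decide
  by_cases h4 : c = '#'
  · subst h4; decide
  have e1 : ('\\' == c) = false := beq_eq_false_iff_ne.mpr (fun h => h1 h.symm)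
  have e2 : ('=' == c) = false := beq_eq_false_iff_ne.mpr (fun h => h2 h.symm)
  have e3 : (';' == c) = false := beq_eq_false_iff_ne.mpr (fun h => h3 h.symm)
  have e4 : ('#' == c) = false := beq_eq_false_iff_ne.mpr (fun h => h4 h.symm)
  simp [List.find?, e1, e2, e3, e4, h1, h2, h3, h4]

-- prefix each piece with a newline
def pvJ (xs : List (List Char)) : List Char := xs.flatMap (fun x => '\n' :: x)

theorem pvJ_cons (x : List Char) (L : List (List Char)) :
    pvJ (x :: L) = '\n' :: x ++ pvJ L := rfl

theorem inter_nl (h : List Char) (t : List (List Char)) :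
    List.intercalate ['\n'] (h :: t) = h ++ pvJ t := by
  induction t generalizing h with
  | nil => simp [pvJ, List.intercalate]
  | cons x xs ih =>
    have hx := ih x
    simp only [List.intercalate, List.intersperse] at hx ⊢
    simp [pvJ] at hx ⊢
    simp [hx]

theorem ends_get (ch : List (Int × String)) (tot : Int) (k : Nat)
    (hk : k < ch.length)
    (hE : k < (pvEnds tot ch).length) :
    (pvEnds tot ch)[k]
      = if h : k + 1 < ch.length then (ch[k + 1]).1 else tot := by
  unfold pvEnds at hE ⊢
  by_cases h : k + 1 < ch.length
  · have hk1 : k < ((ch.drop 1).map (·.1)).length := by simp; omega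
    rw [List.getElem_append_left hk1]
    simp [h]
  · have hk1 : ((ch.drop 1).map (·.1)).length ≤ k := by simp; omega
    rw [List.getElem_append_right hk1]
    simp [h]

-- A equals the middle (zip-with-ends) form
theorem A_eq_pvMid (chapters_ms : List (Int × String)) (total_duration_ms : Int) :
    build_chapter_metadata chapters_ms total_duration_ms
      = pvMid chapters_ms total_duration_ms := by
  apply String.toList_inj.mp
  simp only [build_chapter_metadata, pvMid,
    PySem.List.foldl_append_eq_flatMap, PySem.Str.join, String.toList_ofList,
    PySem.Chars.join, String.toList_append]
  rw [show ("\n".toList : List Char) = ['\n'] from rfl,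
      show ("".toList : List Char) = [] from rfl, inter_nil]
  rw [List.cons_append, List.singleton_append, List.map_cons, List.map_cons, List.map_flatMap,
      inter_nl]
  rw [show (";FFMETADATA1\n".toList : List Char) = ";FFMETADATA1".toList ++ ['\n'] from rfl,
      List.append_assoc]
  congr 1
  rw [show ("".toList : List Char) = [] from rfl, pvJ_cons]
  congr 1
  rw [pvJ, List.flatMap_assoc, List.map_map, List.flatMap_def]
  congr 1
  apply List.ext_getElem
  · rcases chapters_ms with _ | ⟨c, t⟩ <;>
      simp [PySem.List.length_enumerate, List.length_zip, pvEnds]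
  · intro k h1 h2
    rw [List.getElem_map, List.getElem_map, PySem.List.getElem_enumerate, List.getElem_zip]
    have hk : k < chapters_ms.length := by
      simpa [PySem.List.length_enumerate] using h1
    have hE : k < (pvEnds total_duration_ms chapters_ms).length := by
      simp [pvEnds]; omega
    have hend : (pvEnds total_duration_ms chapters_ms)[k]
        = if (0 + (k : Int)) + 1 < (chapters_ms.length : Int)
          then (PySem.List.pyGetD chapters_ms ((0 + (k : Int)) + 1) (0, "")).1
          else total_duration_ms := by
      rw [ends_get chapters_ms total_duration_ms k hk hE]
      by_cases h : k + 1 < chapters_ms.length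
      · have hcast : ((0 + (k : Int)) + 1) = ((k + 1 : Nat) : Int) := by push_cast; ring
        rw [dif_pos h, if_pos (by omega), hcast, PySem.List.pyGetD_natCast,
          List.getD_eq_getElem _ _ h]
      · rw [dif_neg h, if_neg (by omega)]
    simp only [hend, escape_eq_pvEsc, pvBlock, List.map_cons, List.map_nil, List.flatMap_cons,
      List.flatMap_nil, Function.comp_apply, String.toList_append, List.append_nil]
    rw [show ("\n[CHAPTER]\nTIMEBASE=1/1000\nSTART=".toList : List Char)
          = '\n' :: "[CHAPTER]".toList ++ '\n' :: "TIMEBASE=1/1000".toList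
            ++ '\n' :: "START=".toList from rfl,
        show ("\nEND=".toList : List Char) = '\n' :: "END=".toList from rfl,
        show ("\ntitle=".toList : List Char) = '\n' :: "title=".toList from rfl,
        show ("\n".toList : List Char) = ['\n'] from rfl]
    simp

-- zip-with-ends decomposes as cons
theorem zip_ends_cons (x : Int × String) (rest : List (Int × String)) (tot : Int) :
    (x :: rest).zip (pvEnds tot (x :: rest))
      = (x, pvHS rest tot) :: rest.zip (pvEnds tot rest) := by
  cases rest with
  | nil => rfl
  | cons y rest' => rfl

-- the middle form joins to the forward recursive form
theorem mid_blocks_eq_pvS (tot : Int) (ch : List (Int × String)) :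
    (PySem.Str.join "" ((ch.zip (pvEnds tot ch)).map (pvBlock tot))).toList
      = (pvS tot ch).toList := by
  induction ch with
  | nil => rfl
  | cons x rest ih =>
    rw [zip_ends_cons, List.map_cons]
    simp only [PySem.Str.join, String.toList_ofList, PySem.Chars.join,
      show ("".toList : List Char) = [] from rfl, inter_nil, List.map_cons,
      List.flatten_cons] at ih ⊢
    rw [ih]
    simp only [pvBlock, pvS, String.toList_append, pvEsc_eq_alt, List.append_assoc]
    congr 3
    split_ifs with h1 h2 h2 <;> first | rfl | omega

-- B's reverse fold computes (first start, forward recursive form)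
theorem fold_rev_eq (tot : Int) (ch : List (Int × String)) :
    ch.reverse.foldl (fun (p : Int × String) c =>
        let end_ms := if p.1 > c.1 then p.1 else min (c.1 + 1000) tot
        (c.1, "\n[CHAPTER]\nTIMEBASE=1/1000\nSTART=" ++ PySem.Int.toStr c.1 ++
              "\nEND=" ++ PySem.Int.toStr end_ms ++
              "\ntitle=" ++ escape_meta_alt c.2 ++ "\n" ++ p.2))
      (tot, "")
      = (pvHS ch tot, pvS tot ch) := by
  induction ch with
  | nil => rfl
  | cons x rest ih =>
    rw [List.reverse_cons, List.foldl_concat, ih]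
    simp only [pvHS, pvS]

theorem build_chapter_metadata_eq (chapters_ms : List (Int × String)) (total_duration_ms : Int) :
    build_chapter_metadata chapters_ms total_duration_ms
      = build_chapter_metadata_alt chapters_ms total_duration_ms := by
  rw [A_eq_pvMid]
  apply String.toList_inj.mp
  simp only [pvMid, build_chapter_metadata_alt, fold_rev_eq, String.toList_append]
  rw [mid_blocks_eq_pvS]

-- ===== VERDICT (by name: the statement is the Claim_ definition above) =====
theorem build_chapter_metadata_spec : Claim_equal_build_chapter_metadata := by
  intro chapters_ms total_duration_ms _
  exact build_chapter_metadata_eq chapters_ms total_duration_ms
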